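-- pv_equiv track=rewrite | github.com/olevar2/Auj6 | auj_platform/src/indicator_engine/indicators/ai_enhanced/order_flow_imbalance_indicator.py | _detect_direction_runs
-- ===== SOURCE A (Python) =====
-- from typing import Dict, Any, List, Tuple, Optional
--
-- def _detect_direction_runs(directions: List[int]) -> List[int]:
--     """Detect consecutive runs of the same trading direction."""
--     runs = []
--     current_run = 1
--
--     for i in range(1, len(directions)):
--         if directions[i] == directions[i-1]:
--             current_run += 1
--         else:
--             runs.append(current_run)
--             current_run = 1
--
--     runs.append(current_run)
--     return runs
-- ===== SOURCE B (Python) =====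
-- def _detect_direction_runs(directions):
--     """Detect consecutive runs of the same trading direction ([] for empty input)."""
--     runs = []
--     i, n = 0, len(directions)
--     while i < n:
--         j = i + 1
--         while j < n and directions[j] == directions[i]:
--             j += 1
--         runs.append(j - i)
--         i = j
--     return runs
-- ===== Notes on version B (the rewrite author's own statement) =====
-- stated objective: alternative
-- what changed: Replaces the fold over index pairs with a running counter and trailing append by a two-pointer scan that finds each run's end index and emits j - i per group.
-- intended difference: On the empty input list A returns a spurious single run of length one (the leftover current_run sentinel appended after an empty loop) while B returns an empty list, the intended 'no runs' value for no data. — e.g. on _detect_direction_runs([]): A returns [1], B returns []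
import Mathlib
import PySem

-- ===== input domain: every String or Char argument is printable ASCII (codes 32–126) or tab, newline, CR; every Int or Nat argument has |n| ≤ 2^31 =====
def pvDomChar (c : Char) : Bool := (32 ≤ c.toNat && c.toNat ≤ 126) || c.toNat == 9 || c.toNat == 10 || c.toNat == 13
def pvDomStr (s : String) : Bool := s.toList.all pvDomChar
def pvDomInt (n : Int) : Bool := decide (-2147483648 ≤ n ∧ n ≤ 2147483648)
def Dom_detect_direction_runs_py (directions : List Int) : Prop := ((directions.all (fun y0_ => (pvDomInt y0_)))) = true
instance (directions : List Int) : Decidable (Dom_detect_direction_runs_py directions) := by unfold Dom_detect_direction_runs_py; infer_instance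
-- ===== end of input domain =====

-- B replaces A's counter-and-compare-with-previous fold by a two-pointer group scan; on the
-- empty list B returns an empty list instead of A's leftover sentinel run (difference D_).

-- ===== PORT A =====
def detect_direction_runs_py (directions : List Int) : List Int :=
  let st := (PySem.List.pyRange 1 (directions.length : Int) 1).foldl
    (fun (st : List Int × Int) i =>
      if PySem.List.pyGetD directions i 0 = PySem.List.pyGetD directions (i - 1) 0 then
        (st.1, st.2 + 1)
      else
        (st.1 ++ [st.2], 1))
    ([], 1)
  st.1 ++ [st.2]

-- ===== PORT B =====
-- inner while loop: advance j while j < n and directions[j] == directions[i]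
def pvAltInner (directions : List Int) (i j : Nat) : Nat :=
  if h : j < directions.length ∧
      PySem.List.pyGetD directions (j : Int) 0 = PySem.List.pyGetD directions (i : Int) 0 then
    pvAltInner directions i (j + 1)
  else
    j
termination_by directions.length - j
decreasing_by omega

theorem pvAltInner_lt (directions : List Int) (i j : Nat) (h : j ≤ directions.length) :
    j ≤ pvAltInner directions i j ∧ pvAltInner directions i j ≤ directions.length := by
  fun_induction pvAltInner directions i j with
  | case1 j h ih => omega
  | case2 j h => omega

-- outer while loop over run starts
def pvAltOuter (directions : List Int) (i : Nat) (runs : List Int) (_hi : i ≤ directions.length) :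
    List Int :=
  if h : i < directions.length then
    let j := pvAltInner directions i (i + 1)
    pvAltOuter directions j (runs ++ [(j : Int) - (i : Int)])
      (pvAltInner_lt directions i (i + 1) (by omega)).2
  else
    runs
termination_by directions.length - i
decreasing_by
  have := (pvAltInner_lt directions i (i + 1) (by omega)).1
  omega

def detect_direction_runs_py_alt (directions : List Int) : List Int :=
  pvAltOuter directions 0 [] (by omega)

-- ===== PRECONDITION & SPEC =====
-- On the empty input list A returns a spurious single run of length one (the leftover
-- current_run sentinel appended after an empty loop) while B returns an empty list, the
-- intended 'no runs' value for no data.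
def D_detect_direction_runs_py (directions : List Int) : Prop := directions = []
instance (directions : List Int) : Decidable (D_detect_direction_runs_py directions) := by
  unfold D_detect_direction_runs_py; infer_instance

def Spec_detect_direction_runs_py (directions : List Int) (out : List Int) : Prop :=
  ¬ D_detect_direction_runs_py directions → out = detect_direction_runs_py_alt directions
instance (directions : List Int) (out : List Int) :
    Decidable (Spec_detect_direction_runs_py directions out) := by
  unfold Spec_detect_direction_runs_py; infer_instance

def pvDiffWitness_detect_direction_runs_py : List Int := []
def pvDiffWitnessOut_detect_direction_runs_py : (List Int) × (List Int) := ([1], [])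

-- ===== CLAIM =====
def Claim_unchanged_detect_direction_runs_py : Prop :=
  ∀ (directions : List Int), Dom_detect_direction_runs_py directions →
    Spec_detect_direction_runs_py directions (detect_direction_runs_py directions)
def Claim_changed_detect_direction_runs_py : Prop :=
  Dom_detect_direction_runs_py (pvDiffWitness_detect_direction_runs_py) ∧
  D_detect_direction_runs_py (pvDiffWitness_detect_direction_runs_py) ∧
  detect_direction_runs_py (pvDiffWitness_detect_direction_runs_py) =
    pvDiffWitnessOut_detect_direction_runs_py.1 ∧
  detect_direction_runs_py_alt (pvDiffWitness_detect_direction_runs_py) =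
    pvDiffWitnessOut_detect_direction_runs_py.2 ∧
  pvDiffWitnessOut_detect_direction_runs_py.1 ≠ pvDiffWitnessOut_detect_direction_runs_py.2
def Claim_exact_detect_direction_runs_py : Prop :=
  ∀ (directions : List Int), Dom_detect_direction_runs_py directions →
    D_detect_direction_runs_py directions →
    detect_direction_runs_py directions ≠ detect_direction_runs_py_alt directions

-- ===== LEMMAS AND PROOFS =====

-- canonical run-length recursion both ports are reduced to
def pvRunsGo (prev : Int) (c : Int) : List Int → List Int
  | [] => [c]
  | y :: ys => if y = prev then pvRunsGo prev (c + 1) ys else c :: pvRunsGo y 1 ys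

def pvRunsSpec : List Int → List Int
  | [] => []
  | x :: xs => pvRunsGo x 1 xs

theorem pvRunsSpec_cons (x : Int) (xs : List Int) : pvRunsSpec (x :: xs) = pvRunsGo x 1 xs := rfl

-- B side: inner loop characterisation
theorem pvInner_inv (ys : List Int) (i j : Nat) (hij : i < j) (hj : j ≤ ys.length) :
    ((pvAltInner ys i j : Int) - (i : Int)) :: pvRunsSpec (ys.drop (pvAltInner ys i j))
      = pvRunsGo (PySem.List.pyGetD ys (i : Int) 0) ((j : Int) - (i : Int)) (ys.drop j) := by
  fun_induction pvAltInner ys i j with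
  | case1 j h ih =>
    obtain ⟨hjl, heq⟩ := h
    have hdrop : ys.drop j = ys[j] :: ys.drop (j + 1) := List.drop_eq_getElem_cons hjl
    have hget : PySem.List.pyGetD ys (j : Int) 0 = ys[j] := by
      simp [PySem.List.pyGetD_natCast, List.getD_eq_getElem?_getD, hjl]
    rw [hdrop, pvRunsGo]
    rw [hget] at heq
    rw [if_pos heq]
    have := ih (by omega) (by omega)
    rw [this]
    congr 1
    push_cast
    ring
  | case2 j h =>
    rcases Nat.lt_or_ge j ys.length with hjl | hjl
    · have hdrop : ys.drop j = ys[j] :: ys.drop (j + 1) := List.drop_eq_getElem_cons hjl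
      have hget : PySem.List.pyGetD ys (j : Int) 0 = ys[j] := by
        simp [PySem.List.pyGetD_natCast, List.getD_eq_getElem?_getD, hjl]
      have hne : ¬ (ys[j] = PySem.List.pyGetD ys (i : Int) 0) := by
        intro hc; exact h ⟨hjl, by rw [hget, hc]⟩
      rw [hdrop, pvRunsSpec_cons, pvRunsGo, if_neg hne]
    · have : ys.drop j = [] := List.drop_eq_nil_of_le hjl
      rw [this, pvRunsGo]
      simp [pvRunsSpec]

-- B side: outer loop characterisation
theorem pvOuter_inv (ys : List Int) (i : Nat) (hi : i ≤ ys.length) (runs : List Int) :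
    pvAltOuter ys i runs hi = runs ++ pvRunsSpec (ys.drop i) := by
  fun_induction pvAltOuter ys i runs hi with
  | case1 i runs hi h j ih =>
    rw [ih]
    have hdrop : ys.drop i = ys[i] :: ys.drop (i + 1) := List.drop_eq_getElem_cons h
    have hget : PySem.List.pyGetD ys (i : Int) 0 = ys[i] := by
      simp [PySem.List.pyGetD_natCast, List.getD_eq_getElem?_getD, h]
    have hinner := pvInner_inv ys i (i + 1) (by omega) (by omega)
    push_cast at hinner
    have : pvRunsSpec (ys.drop i)
        = ((j : Int) - (i : Int)) :: pvRunsSpec (ys.drop j) := by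
      rw [hdrop, pvRunsSpec_cons]
      have : pvRunsGo ys[i] 1 (ys.drop (i + 1))
          = pvRunsGo (PySem.List.pyGetD ys (i : Int) 0) (((i : Int) + 1) - (i : Int))
              (ys.drop (i + 1)) := by
        rw [hget]; congr 1; ring
      rw [this]
      rw [← hinner]
    rw [this]
    simp
  | case2 i runs hi h =>
    have : ys.drop i = [] := List.drop_eq_nil_of_le (by omega)
    rw [this]
    simp [pvRunsSpec]

theorem pvAlt_eq_spec (ys : List Int) : detect_direction_runs_py_alt ys = pvRunsSpec ys := by
  rw [detect_direction_runs_py_alt, pvOuter_inv]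
  simp

-- A side: the fold's step function
def pvStepA (ys : List Int) (st : List Int × Int) (i : Int) : List Int × Int :=
  if PySem.List.pyGetD ys i 0 = PySem.List.pyGetD ys (i - 1) 0 then
    (st.1, st.2 + 1)
  else
    (st.1 ++ [st.2], 1)

-- A side: loop invariant over the index range
theorem pvFoldA_inv (ys : List Int) (i : Nat) (h1 : 1 ≤ i) (h2 : i ≤ ys.length)
    (runs : List Int) (c : Int) :
    (((PySem.List.pyRange (i : Int) (ys.length : Int) 1).foldl (pvStepA ys) (runs, c)).1
      ++ [((PySem.List.pyRange (i : Int) (ys.length : Int) 1).foldl (pvStepA ys) (runs, c)).2])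
    = runs ++ pvRunsGo (PySem.List.pyGetD ys ((i : Int) - 1) 0) c (ys.drop i) := by
  rcases Nat.lt_or_ge i ys.length with hlt | hge
  · have hcons : PySem.List.pyRange (i : Int) (ys.length : Int) 1
        = (i : Int) :: PySem.List.pyRange ((i : Int) + 1) (ys.length : Int) 1 :=
      PySem.List.pyRange_one_cons (by exact_mod_cast hlt)
    have hdrop : ys.drop i = ys[i] :: ys.drop (i + 1) := List.drop_eq_getElem_cons hlt
    have hget : PySem.List.pyGetD ys (i : Int) 0 = ys[i] := by
      simp [PySem.List.pyGetD_natCast, List.getD_eq_getElem?_getD, hlt]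
    rw [hcons, List.foldl_cons]
    rw [hdrop, pvRunsGo]
    by_cases heq : ys[i] = PySem.List.pyGetD ys ((i : Int) - 1) 0
    · rw [if_pos heq]
      have hstep : pvStepA ys (runs, c) (i : Int) = (runs, c + 1) := by
        rw [pvStepA, if_pos (by rw [hget, heq])]
      rw [hstep]
      have hih := pvFoldA_inv ys (i + 1) (by omega) (by omega) runs (c + 1)
      have hcast : ((i : Int) + 1) = ((i + 1 : Nat) : Int) := by push_cast; ring
      rw [hcast]
      have hprev : PySem.List.pyGetD ys (((i + 1 : Nat) : Int) - 1) 0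
          = PySem.List.pyGetD ys ((i : Int) - 1) 0 := by
        have h' : (((i + 1 : Nat) : Int) - 1) = (i : Int) := by push_cast; ring
        rw [h', hget, heq]
      rw [hprev] at hih
      rw [hih]
    · rw [if_neg heq]
      have hstep : pvStepA ys (runs, c) (i : Int) = (runs ++ [c], 1) := by
        rw [pvStepA, if_neg (by rw [hget]; exact heq)]
      rw [hstep]
      have hih := pvFoldA_inv ys (i + 1) (by omega) (by omega) (runs ++ [c]) 1
      have hcast : ((i : Int) + 1) = ((i + 1 : Nat) : Int) := by push_cast; ring
      rw [hcast]
      rw [hih]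
      have : PySem.List.pyGetD ys (((i + 1 : Nat) : Int) - 1) 0 = ys[i] := by
        have : (((i + 1 : Nat) : Int) - 1) = (i : Int) := by push_cast; ring
        rw [this, hget]
      rw [this]
      simp
  · have hle : i = ys.length := by omega
    have hnil : PySem.List.pyRange (i : Int) (ys.length : Int) 1 = [] :=
      PySem.List.pyRange_one_eq_nil (by exact_mod_cast Nat.le_of_eq hle.symm)
    have hdrop : ys.drop i = [] := List.drop_eq_nil_of_le (by omega)
    rw [hnil, List.foldl_nil, hdrop, pvRunsGo]
termination_by ys.length - i

theorem pvA_eq_spec (x : Int) (xs : List Int) :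
    detect_direction_runs_py (x :: xs) = pvRunsSpec (x :: xs) := by
  rw [detect_direction_runs_py]
  show (((PySem.List.pyRange ((1 : Nat) : Int) (((x :: xs).length : Nat) : Int) 1).foldl
      (pvStepA (x :: xs)) ([], 1)).1
    ++ [((PySem.List.pyRange ((1 : Nat) : Int) (((x :: xs).length : Nat) : Int) 1).foldl
      (pvStepA (x :: xs)) ([], 1)).2]) = pvRunsSpec (x :: xs)
  rw [pvFoldA_inv (x :: xs) 1 (by omega) (by simp) [] 1]
  have : PySem.List.pyGetD (x :: xs) (((1 : Nat) : Int) - 1) 0 = x := by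
    norm_num [PySem.List.pyGetD_zero_cons]
  rw [this]
  simp [pvRunsSpec]

theorem pvA_nil : detect_direction_runs_py [] = [1] := by
  simp [detect_direction_runs_py, PySem.List.pyRange_one_eq_nil]

-- ===== VERDICT =====
theorem detect_direction_runs_py_spec : Claim_unchanged_detect_direction_runs_py := by
  intro directions _ hD
  cases directions with
  | nil => exact absurd rfl hD
  | cons x xs => rw [pvA_eq_spec, pvAlt_eq_spec]

theorem detect_direction_runs_py_changed : Claim_changed_detect_direction_runs_py := by
  unfold Claim_changed_detect_direction_runs_py
  refine ⟨by decide, rfl, ?_, ?_, by decide⟩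
  · exact pvA_nil
  · show detect_direction_runs_py_alt [] = []
    rw [pvAlt_eq_spec]
    rfl

theorem detect_direction_runs_py_tight : Claim_exact_detect_direction_runs_py := by
  intro directions _ hD
  subst hD
  rw [pvA_nil, pvAlt_eq_spec]
  simp [pvRunsSpec]
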